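-- pv_equiv track=rewrite | github.com/nklopstock611/leetCode | easy/python/cheapTravel.py | multiples
-- ===== SOURCE A (Python) =====
-- def multiples(l: list) -> int:
--     n = l[0]
--     m = l[1]
--     b = l[2]
--     a = l[3]
--     v = 0
--
--     for i in range(m):
--         v += a
--
--     d = v
--
--     for i in range(abs(n - v)):
--         d += b
--
--     return d
-- ===== SOURCE B (Python) =====
-- def multiples(l: list) -> int:
--     n, m, b, a = l[:4]
--     v = a * m if m > 0 else 0
--     return v + b * abs(n - v)
-- ===== Notes on version B (the rewrite author's own statement) =====
-- stated objective: faster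
-- what changed: Replaced the two accumulation loops (m additions of a, then |n-v| additions of b) with unpacking the first four elements and the closed-form arithmetic v + b*|n - v| where v = a*m for positive m and 0 otherwise.
import Mathlib
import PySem

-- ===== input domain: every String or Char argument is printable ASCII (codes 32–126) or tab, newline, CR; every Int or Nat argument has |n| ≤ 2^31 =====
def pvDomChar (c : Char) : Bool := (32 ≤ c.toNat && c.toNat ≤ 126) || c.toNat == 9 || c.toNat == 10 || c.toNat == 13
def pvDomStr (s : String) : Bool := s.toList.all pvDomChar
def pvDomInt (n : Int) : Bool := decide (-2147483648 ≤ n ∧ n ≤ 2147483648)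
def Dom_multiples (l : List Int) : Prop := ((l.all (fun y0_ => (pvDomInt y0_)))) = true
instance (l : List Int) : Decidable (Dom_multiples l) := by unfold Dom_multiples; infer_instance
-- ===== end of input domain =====

-- B unpacks the first four elements and replaces A's two accumulation loops by closed-form arithmetic (O(1) vs O(m + |n-a*m|)).

-- ===== PORT A =====
def multiples (l : List Int) : Int :=
  let n := (PySem.List.pyGet? l 0).getD 0   -- l[0]; Pre_ guarantees the index is in range
  let m := (PySem.List.pyGet? l 1).getD 0
  let b := (PySem.List.pyGet? l 2).getD 0
  let a := (PySem.List.pyGet? l 3).getD 0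
  let v : Int := (PySem.List.pyRange 0 m 1).foldl (fun v _ => v + a) 0
  let d : Int := v
  let d := (PySem.List.pyRange 0 ((n - v).natAbs : Int) 1).foldl (fun d _ => d + b) d
  d

-- ===== PORT B =====
def multiples_alt (l : List Int) : Int :=
  match l with
  | n :: m :: b :: a :: _ =>          -- n, m, b, a = l[:4]
      let v : Int := if m > 0 then a * m else 0
      v + b * ((n - v).natAbs : Int)
  | _ => 0                            -- unreachable under Pre_ (Python raises ValueError here)

-- ===== PRECONDITION & SPEC =====
-- Pre_ excludes exactly the lists of fewer than 4 elements, on which both programs raise.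
def Pre_multiples (l : List Int) : Prop := 4 ≤ l.length
instance (l : List Int) : Decidable (Pre_multiples l) := by unfold Pre_multiples; infer_instance
def pvWitness_multiples : List Int := [7, 3, 2, 1]

def Spec_multiples (l : List Int) (out : Int) : Prop := out = multiples_alt l
instance (l : List Int) (out : Int) : Decidable (Spec_multiples l out) := by unfold Spec_multiples; infer_instance

-- ===== CLAIM =====
def Claim_equal_multiples : Prop := ∀ (l : List Int), Dom_multiples l → Pre_multiples l → Spec_multiples l (multiples l)

-- ===== LEMMAS AND PROOFS =====

theorem foldl_const_add (xs : List Int) (c init : Int) :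
    xs.foldl (fun s _ => s + c) init = init + c * xs.length := by
  induction xs generalizing init with
  | nil => simp
  | cons x t ih => simp [List.foldl, ih]; ring

theorem foldl_pyRange_const_add (k : Int) (c init : Int) :
    (PySem.List.pyRange 0 k 1).foldl (fun s _ => s + c) init = init + c * max k 0 := by
  rw [foldl_const_add, PySem.List.length_pyRange_one]
  have : ((k - 0).toNat : Int) = max k 0 := by omega
  rw [this]

-- ===== VERDICT =====
theorem multiples_spec : Claim_equal_multiples := by
  intro l _ hpre
  match l, hpre with
  | n :: m :: b :: a :: t, _ =>
    unfold Spec_multiples multiples multiples_alt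
    simp only [foldl_pyRange_const_add]
    simp [PySem.List.pyGet?, PySem.List.pyIdx?,
      show (3:Int) ≤ (t.length:Int)+1+1+1 by omega,
      show (2:Int) ≤ (t.length:Int)+1+1+1 by omega,
      show (0:Int) ≤ (t.length:Int)+1+1 by omega,
      show (0:Int) ≤ (t.length:Int)+1+1+1 by omega]
    have hv : a * max m 0 = (if m > 0 then a * m else 0) := by
      rcases le_or_gt m 0 with h | h
      · simp [max_eq_right h, not_lt.mpr h]
      · simp [max_eq_left h.le, h]
    rw [hv]
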